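-- pv_equiv track=rewrite | github.com/YoussefElAseri/C_compiler | Nodes.py | getHighestOrder
-- ===== SOURCE A (Python) =====
-- def getHighestOrder(left, right):
--     for i in [left, right]:
--         if "*" in i or "[]" in i or i == "address":
--             raise Exception(f"Incompatible types {left} and {right}!")
--
--     if left == "float" or right == "float":
--         return "float"
--     elif left == "int" or right == "int":
--         return "int"
--     elif left == "char" or right == "char":
--         return "char"
--     elif left == "bool" or right == "bool":
--         return "bool"
--     else:
--         raise Exception(f"Unknown type {left} or {right} in getHighestOrder!")
-- ===== SOURCE B (Python) =====
-- PRIORITY = ["float", "int", "char", "bool"]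
--
-- def getHighestOrder(left, right):
--     if any("*" in i or "[]" in i or i == "address" for i in (left, right)):
--         raise Exception(f"Incompatible types {left} and {right}!")
--
--     def pick(order):
--         if not order:
--             raise Exception(f"Unknown type {left} or {right} in getHighestOrder!")
--         if order[0] == left or order[0] == right:
--             return order[0]
--         return pick(order[1:])
--
--     return pick(PRIORITY)
-- ===== Notes on version B (the rewrite author's own statement) =====
-- stated objective: alternative
-- what changed: Replaces the hardcoded four-level if/elif cascade with a recursive first-match search over an explicit priority list: pick walks PRIORITY and returns the first name equal to either operand, raising the same Unknown-type message when the list is exhausted.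
import Mathlib
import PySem

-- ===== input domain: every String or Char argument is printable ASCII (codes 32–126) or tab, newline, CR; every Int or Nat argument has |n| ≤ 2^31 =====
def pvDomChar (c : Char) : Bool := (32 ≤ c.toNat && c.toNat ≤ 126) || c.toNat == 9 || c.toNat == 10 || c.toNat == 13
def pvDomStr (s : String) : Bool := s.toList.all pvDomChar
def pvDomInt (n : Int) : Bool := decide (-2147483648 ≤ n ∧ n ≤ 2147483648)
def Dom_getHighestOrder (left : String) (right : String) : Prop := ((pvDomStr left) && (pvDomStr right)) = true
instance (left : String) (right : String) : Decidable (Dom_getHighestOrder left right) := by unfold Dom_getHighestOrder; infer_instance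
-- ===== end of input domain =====

-- ===== PORT A =====
-- B changes: recursive first-match search over an explicit priority list instead of the
-- hardcoded if/elif cascade (alternative decomposition; same cost). A's two raise sites
-- (incompatible pointer/array/address types; unknown types) are excluded by Pre_.
def pvIncompat (s : String) : Bool :=
  PySem.Str.isIn "*" s || PySem.Str.isIn "[]" s || s == "address"

def getHighestOrder (left : String) (right : String) : String :=
  if pvIncompat left || pvIncompat right then ""  -- Python raises here; excluded by Pre_
  else if left == "float" || right == "float" then "float"
  else if left == "int" || right == "int" then "int"
  else if left == "char" || right == "char" then "char"
  else if left == "bool" || right == "bool" then "bool"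
  else ""  -- Python raises here; excluded by Pre_

-- ===== PORT B =====
-- B's recursive helper pick: first element of the priority list equal to an operand.
def pvPick (left right : String) : List String → Option String
  | [] => none  -- Python raises "Unknown type …" here; excluded by Pre_
  | o :: rest => if o == left || o == right then some o else pvPick left right rest

def pvPriority : List String := ["float", "int", "char", "bool"]

def getHighestOrder_alt (left : String) (right : String) : String :=
  if pvIncompat left || pvIncompat right then ""  -- Python raises here; excluded by Pre_
  else (pvPick left right pvPriority).getD ""  -- none only outside Pre_

-- ===== PRECONDITION & SPEC =====
-- Pre_ excludes exactly the inputs on which A raises: an operand containing "*" or "[]" or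
-- equal to "address" (Incompatible types), or neither operand being one of the four known
-- types (Unknown type).
def Pre_getHighestOrder (left : String) (right : String) : Prop :=
  pvIncompat left = false ∧ pvIncompat right = false ∧
  (left = "float" ∨ left = "int" ∨ left = "char" ∨ left = "bool" ∨
   right = "float" ∨ right = "int" ∨ right = "char" ∨ right = "bool")
instance (left : String) (right : String) : Decidable (Pre_getHighestOrder left right) := by
  unfold Pre_getHighestOrder; infer_instance

def pvWitness_getHighestOrder : String × String := ("int", "float")

def Spec_getHighestOrder (left : String) (right : String) (out : String) : Prop := out = getHighestOrder_alt left right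
instance (left : String) (right : String) (out : String) : Decidable (Spec_getHighestOrder left right out) := by unfold Spec_getHighestOrder; infer_instance

-- ===== CLAIM (what is proved, stated in full; the proofs are below) =====
def Claim_equal_getHighestOrder : Prop := ∀ (left : String) (right : String), Dom_getHighestOrder left right → Pre_getHighestOrder left right → Spec_getHighestOrder left right (getHighestOrder left right)

-- ===== LEMMAS AND PROOFS =====

theorem equal_core (left right : String)
    (h : Pre_getHighestOrder left right) :
    getHighestOrder left right = getHighestOrder_alt left right := by
  obtain ⟨hl, hr, hk⟩ := h
  have hA : getHighestOrder left right =
      (if left == "float" || right == "float" then "float"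
       else if left == "int" || right == "int" then "int"
       else if left == "char" || right == "char" then "char"
       else if left == "bool" || right == "bool" then "bool" else "") := by
    unfold getHighestOrder; rw [hl, hr]; simp
  have hB : getHighestOrder_alt left right =
      (pvPick left right pvPriority).getD "" := by
    unfold getHighestOrder_alt; rw [hl, hr]; simp
  rw [hA, hB]; clear hA hB hl hr
  rcases hk with h | h | h | h | h | h | h | h <;> subst h <;>
  · first
    | (by_cases h1 : right = "float"
       · subst h1; decide
       by_cases h2 : right = "int"
       · subst h2; decide
       by_cases h3 : right = "char"
       · subst h3; decide
       by_cases h4 : right = "bool"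
       · subst h4; decide
       simp [pvPick, pvPriority, h1, h2, h3, h4, Ne.symm h1, Ne.symm h2, Ne.symm h3, Ne.symm h4])
    | (by_cases h1 : left = "float"
       · subst h1; decide
       by_cases h2 : left = "int"
       · subst h2; decide
       by_cases h3 : left = "char"
       · subst h3; decide
       by_cases h4 : left = "bool"
       · subst h4; decide
       simp [pvPick, pvPriority, h1, h2, h3, h4, Ne.symm h1, Ne.symm h2, Ne.symm h3, Ne.symm h4])

-- ===== VERDICT (by name: the statement is the Claim_ definition above) =====
theorem getHighestOrder_spec : Claim_equal_getHighestOrder := by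
  intro left right _ hpre
  exact equal_core left right hpre
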